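-- pv_equiv track=rewrite | github.com/Harrilee/wechat_annual_report | data_processing/utils/process_one_user.py | get_max_index_and_length
-- ===== SOURCE A (Python) =====
-- def get_max_index_and_length(lissy: list) -> (int, int):
--     """
--     给定一个数组，求其最大连续非0项的长度和起始indeex
--     :param lissy: 给定的数组
--     :return: 起始编号、最大长度
--     """
--     max_length = 0
--     current_length = 0
--     max_index = 0
--     current_index = 0
--     for i in range(len(lissy)):
--         if lissy[i] != 0:
--             current_length += 1
--         else:
--             if current_length > max_length:
--                 max_length = current_length
--                 max_index = current_index
--             current_index = i + 1
--             current_length = 0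
--     if current_length > max_length:
--         max_length = current_length
--         max_index = current_index
--     return max_index, max_length
-- ===== SOURCE B (Python) =====
-- def get_max_index_and_length(lissy: list) -> (int, int):
--     """Longest run of non-zero entries: runs are the gaps between consecutive
--     zero positions, so collect the zero indices once and scan the gaps."""
--     zeros = [i for i, x in enumerate(lissy) if x == 0]
--     boundaries = [-1] + zeros + [len(lissy)]
--     best_len = 0
--     best_idx = 0
--     for a, b in zip(boundaries, boundaries[1:]):
--         run_len = b - a - 1
--         if run_len > best_len:
--             best_len = run_len
--             best_idx = a + 1
--     return best_idx, best_len
-- ===== Notes on version B (the rewrite author's own statement) =====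
-- stated objective: alternative
-- what changed: Instead of a per-index scan with four running state variables, B collects the zero positions once and computes each run as the gap between consecutive boundaries (-1, the zero indices, len), keeping the first maximal gap.
import Mathlib
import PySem

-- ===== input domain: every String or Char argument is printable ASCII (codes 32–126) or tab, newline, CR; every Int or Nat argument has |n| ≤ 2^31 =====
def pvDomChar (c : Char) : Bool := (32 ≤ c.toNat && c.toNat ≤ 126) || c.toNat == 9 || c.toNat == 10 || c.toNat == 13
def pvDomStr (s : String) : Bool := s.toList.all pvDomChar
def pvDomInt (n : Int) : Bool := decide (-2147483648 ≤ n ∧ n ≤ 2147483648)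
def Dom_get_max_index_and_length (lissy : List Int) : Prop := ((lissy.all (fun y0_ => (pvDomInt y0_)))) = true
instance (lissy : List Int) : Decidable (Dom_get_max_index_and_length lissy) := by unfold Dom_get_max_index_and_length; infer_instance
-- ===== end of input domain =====

-- B replaces A's per-index scan (four running state variables) by collecting the zero
-- positions once and scanning the gaps between consecutive boundaries; alternative
-- decomposition, same asymptotic cost.

-- ===== PORT A =====
-- A's 'for i in range(len(lissy))' with lissy[i]: the obvious structural recursion over
-- the list carrying the index i and A's four loop variables.
def pvLoopA : List Int → Int → Int → Int → Int → Int → Int × Int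
  | [], _, max_length, current_length, max_index, current_index =>
      if current_length > max_length then (current_index, current_length)
      else (max_index, max_length)
  | x :: xs, i, max_length, current_length, max_index, current_index =>
      if x ≠ 0 then
        pvLoopA xs (i + 1) max_length (current_length + 1) max_index current_index
      else
        if current_length > max_length then
          pvLoopA xs (i + 1) current_length 0 current_index (i + 1)
        else
          pvLoopA xs (i + 1) max_length 0 max_index (i + 1)

def get_max_index_and_length (lissy : List Int) : Int × Int :=
  pvLoopA lissy 0 0 0 0 0

-- ===== PORT B =====
def get_max_index_and_length_alt (lissy : List Int) : Int × Int :=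
  let zeros : List Int :=
    (PySem.List.enumerate lissy).filterMap (fun p => if p.2 == 0 then some p.1 else none)
  let boundaries : List Int := [-1] ++ zeros ++ [(lissy.length : Int)]
  let s := (boundaries.zip boundaries.tail).foldl
      (fun (s : Int × Int) (p : Int × Int) =>
        if p.2 - p.1 - 1 > s.1 then (p.2 - p.1 - 1, p.1 + 1) else s)
      (0, 0)
  (s.2, s.1)

-- ===== PRECONDITION & SPEC =====
def Spec_get_max_index_and_length (lissy : List Int) (out : Int × Int) : Prop := out = get_max_index_and_length_alt lissy
instance (lissy : List Int) (out : Int × Int) : Decidable (Spec_get_max_index_and_length lissy out) := by unfold Spec_get_max_index_and_length; infer_instance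

-- ===== CLAIM (what is proved, stated in full; the proofs are below) =====
def Claim_equal_get_max_index_and_length : Prop := ∀ (lissy : List Int), Dom_get_max_index_and_length lissy → Spec_get_max_index_and_length lissy (get_max_index_and_length lissy)

-- ===== LEMMAS AND PROOFS =====

-- zero positions of the list, offset by i (characterises B's 'zeros')
def pvZrec : List Int → Int → List Int
  | [], _ => []
  | x :: xs, i => if x = 0 then i :: pvZrec xs (i + 1) else pvZrec xs (i + 1)

-- one gap update of B's loop
def pvStep (s : Int × Int) (a b : Int) : Int × Int :=
  if b - a - 1 > s.1 then (b - a - 1, a + 1) else s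

-- B's fold over consecutive boundary pairs, in recursive form
def pvBfold : Int × Int → Int → List Int → Int → Int × Int
  | s, a, [], e => pvStep s a e
  | s, a, z :: zs, e => pvBfold (pvStep s a z) z zs e

theorem pvZeros_eq (l : List Int) : ∀ (i : Int),
    (PySem.List.enumerate l i).filterMap (fun p => if p.2 == 0 then some p.1 else none)
      = pvZrec l i := by
  induction l with
  | nil => intro i; simp [pvZrec]
  | cons x xs ih =>
      intro i
      rw [PySem.List.enumerate_cons, List.filterMap_cons, ih]
      by_cases hx : x = 0 <;> simp [pvZrec, hx]

theorem pvZipfold_eq (zs : List Int) : ∀ (a e : Int) (s : Int × Int),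
    (((a :: zs ++ [e]).zip (a :: zs ++ [e]).tail).foldl
        (fun (s : Int × Int) (p : Int × Int) =>
          if p.2 - p.1 - 1 > s.1 then (p.2 - p.1 - 1, p.1 + 1) else s) s)
      = pvBfold s a zs e := by
  induction zs with
  | nil =>
      intro a e s
      simp [pvBfold, pvStep]
  | cons z zs ih =>
      intro a e s
      simpa [pvBfold] using ih z e (pvStep s a z)

theorem pvLoopA_eq (xs : List Int) : ∀ (i ml cl mi : Int),
    pvLoopA xs i ml cl mi (i - cl)
      = ((pvBfold (ml, mi) (i - cl - 1) (pvZrec xs i) (i + xs.length)).2,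
         (pvBfold (ml, mi) (i - cl - 1) (pvZrec xs i) (i + xs.length)).1) := by
  induction xs with
  | nil =>
      intro i ml cl mi
      simp only [pvLoopA, pvZrec, pvBfold, pvStep, List.length_nil, Nat.cast_zero, add_zero]
      have h1 : i - (i - cl - 1) - 1 = cl := by ring
      have h2 : i - cl - 1 + 1 = i - cl := by ring
      rw [h1, h2]
      split_ifs <;> rfl
  | cons x xs ih =>
      intro i ml cl mi
      by_cases hx : x = 0
      · -- zero element: flush the current run, boundary at i
        subst hx
        have hz : pvZrec ((0:Int) :: xs) i = i :: pvZrec xs (i + 1) := by simp [pvZrec]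
        have hlen : i + ((((0:Int) :: xs).length : Nat) : Int) = (i + 1) + (xs.length : Int) := by
          rw [List.length_cons]; push_cast; ring
        rw [hz, hlen]
        simp only [pvBfold]
        have hstep : pvStep (ml, mi) (i - cl - 1) i
            = (if cl > ml then (cl, i - cl) else (ml, mi)) := by
          simp only [pvStep]
          have h1 : i - (i - cl - 1) - 1 = cl := by ring
          have h2 : i - cl - 1 + 1 = i - cl := by ring
          rw [h1, h2]
        rw [hstep]
        have hA : pvLoopA ((0:Int) :: xs) i ml cl mi (i - cl)
            = (if cl > ml then pvLoopA xs (i + 1) cl 0 (i - cl) (i + 1)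
               else pvLoopA xs (i + 1) ml 0 mi (i + 1)) := by
          simp [pvLoopA]
        rw [hA]
        have e1 := ih (i + 1) cl 0 (i - cl)
        have e2 := ih (i + 1) ml 0 mi
        have h3 : i + 1 - (0 : Int) = i + 1 := by ring
        have h4 : i + 1 - (1 : Int) = i := by ring
        rw [h3] at e1 e2
        rw [h4] at e1 e2
        split_ifs with hc
        · exact e1
        · exact e2
      · -- non-zero element: the current run grows
        have hz : pvZrec (x :: xs) i = pvZrec xs (i + 1) := by simp [pvZrec, hx]
        have hlen : i + (((x :: xs).length : Nat) : Int) = (i + 1) + (xs.length : Int) := by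
          rw [List.length_cons]; push_cast; ring
        rw [hz, hlen]
        have hA : pvLoopA (x :: xs) i ml cl mi (i - cl)
            = pvLoopA xs (i + 1) ml (cl + 1) mi (i - cl) := by
          simp [pvLoopA, hx]
        rw [hA]
        have e := ih (i + 1) ml (cl + 1) mi
        have h1 : i + 1 - (cl + 1) = i - cl := by ring
        rw [h1] at e
        exact e

-- ===== VERDICT (by name: the statement is the Claim_ definition above) =====
theorem get_max_index_and_length_spec : Claim_equal_get_max_index_and_length := by
  intro lissy _
  unfold Spec_get_max_index_and_length get_max_index_and_length get_max_index_and_length_alt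
  rw [pvZeros_eq lissy 0]
  simp only [List.cons_append, List.nil_append]
  have hz := pvZipfold_eq (pvZrec lissy 0) (-1) (lissy.length : Int) ((0 : Int), (0 : Int))
  simp only [List.cons_append] at hz
  rw [hz]
  have h := pvLoopA_eq lissy 0 0 0 0
  simpa using h
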